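-- pv_equiv track=rewrite | github.com/SDV16/voetbal-opstelling | app.py | build_blocks_from_pattern
-- ===== SOURCE A (Python) =====
-- def build_blocks_from_pattern(pattern):
--     blocks = []
--     start = 0
--     for size in pattern:
--         end = start + size
--         # blok mag niet door de rust heen
--         if start < 45 < end:
--             return None # ongeldig patroon
--         blocks.append((f"{int(start)}-{int(end)}", size))
--         start = end
--     return blocks
-- ===== SOURCE B (Python) =====
-- def build_blocks_from_pattern(pattern):
--     # check-then-build over precomputed prefix-sum boundaries
--     bounds = [0]
--     for size in pattern:
--         bounds.append(bounds[-1] + size)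
--     if any(s < 45 < e for s, e in zip(bounds, bounds[1:])):
--         return None
--     return [(f"{int(s)}-{int(e)}", size)
--             for (s, e), size in zip(zip(bounds, bounds[1:]), pattern)]
-- ===== Notes on version B (the rewrite author's own statement) =====
-- stated objective: idiomatic
-- what changed: B precomputes the prefix-sum boundaries once, rejects any block crossing 45 in a separate any() pass, and builds the labels by zipping consecutive boundary pairs with the sizes, instead of A's single interleaved accumulating loop with an early return.
import Mathlib
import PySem

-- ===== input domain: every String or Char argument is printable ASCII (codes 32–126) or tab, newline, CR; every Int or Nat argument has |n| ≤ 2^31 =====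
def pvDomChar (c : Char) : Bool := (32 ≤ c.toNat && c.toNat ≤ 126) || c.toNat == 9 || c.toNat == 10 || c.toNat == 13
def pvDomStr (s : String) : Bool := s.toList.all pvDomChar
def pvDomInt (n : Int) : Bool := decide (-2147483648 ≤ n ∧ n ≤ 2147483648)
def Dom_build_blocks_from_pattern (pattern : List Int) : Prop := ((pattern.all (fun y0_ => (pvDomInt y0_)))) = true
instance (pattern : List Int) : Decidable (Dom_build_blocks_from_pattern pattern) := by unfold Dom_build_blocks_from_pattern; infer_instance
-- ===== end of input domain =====

-- B precomputes prefix-sum boundaries, checks the 45-crossing in a separate pass,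
-- then builds labels by zipping boundary pairs with the sizes (idiomatic decomposition; same cost).


-- ===== PORT A =====
-- A's loop: accumulate start, early-return none on a crossing block, append label pairs.
def bbfpGoA (pattern : List Int) (start : Int) (acc : List (String × Int)) :
    Option (List (String × Int)) :=
  match pattern with
  | [] => some acc.reverse
  | size :: rest =>
    let e := start + size
    if start < 45 ∧ 45 < e then none
    else bbfpGoA rest e ((PySem.Int.toStr start ++ "-" ++ PySem.Int.toStr e, size) :: acc)

def build_blocks_from_pattern (pattern : List Int) : Option (List (String × Int)) :=
  bbfpGoA pattern 0 []

-- ===== PORT B =====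
-- Source B's bounds-building loop: prefix sums starting at `start`.
def bbfpBounds (start : Int) (pattern : List Int) : List Int :=
  match pattern with
  | [] => [start]
  | x :: xs => start :: bbfpBounds (start + x) xs

def build_blocks_from_pattern_alt (pattern : List Int) : Option (List (String × Int)) :=
  let bounds := bbfpBounds 0 pattern
  let pairs := bounds.zip bounds.tail
  if pairs.any (fun p => decide (p.1 < 45) && decide (45 < p.2)) then none
  else some ((pairs.zip pattern).map
    (fun q => (PySem.Int.toStr q.1.1 ++ "-" ++ PySem.Int.toStr q.1.2, q.2)))

-- ===== PRECONDITION & SPEC =====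
def Spec_build_blocks_from_pattern (pattern : List Int) (out : Option (List (String × Int))) : Prop := out = build_blocks_from_pattern_alt pattern
instance (pattern : List Int) (out : Option (List (String × Int))) : Decidable (Spec_build_blocks_from_pattern pattern out) := by unfold Spec_build_blocks_from_pattern; infer_instance

-- ===== CLAIM (what is proved, stated in full; the proofs are below) =====
def Claim_equal_build_blocks_from_pattern : Prop := ∀ (pattern : List Int), Dom_build_blocks_from_pattern pattern → Spec_build_blocks_from_pattern pattern (build_blocks_from_pattern pattern)

-- ===== LEMMAS AND PROOFS =====
lemma bbfpGoA_eq (pattern : List Int) : ∀ (start : Int) (acc : List (String × Int)),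
    bbfpGoA pattern start acc =
      (let bounds := bbfpBounds start pattern
       let pairs := bounds.zip bounds.tail
       if pairs.any (fun p => decide (p.1 < 45) && decide (45 < p.2)) then none
       else some (acc.reverse ++ (pairs.zip pattern).map
         (fun q => (PySem.Int.toStr q.1.1 ++ "-" ++ PySem.Int.toStr q.1.2, q.2)))) := by
  induction pattern with
  | nil => intro start acc; simp [bbfpGoA, bbfpBounds]
  | cons size rest ih =>
    intro start acc
    have hcons : ∀ s x xs, bbfpBounds s (x :: xs) = s :: bbfpBounds (s + x) xs := fun _ _ _ => rfl
    have hne : ∀ s l, bbfpBounds s l ≠ [] := by intro s l; cases l <;> simp [bbfpBounds]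
    obtain ⟨e', t, ht⟩ : ∃ e' t, bbfpBounds (start + size) rest = e' :: t := by
      cases hrec : bbfpBounds (start + size) rest with
      | nil => exact absurd hrec (hne _ _)
      | cons a b => exact ⟨a, b, rfl⟩
    have he' : e' = start + size := by
      cases rest <;> simp [bbfpBounds] at ht <;> omega
    subst he'
    simp only [bbfpGoA, hcons, ht, List.tail, List.zip_cons_cons, List.any_cons,
      List.map_cons, ih (start + size)]
    by_cases h : start < 45 ∧ 45 < start + size
    · simp [h]
    · have hb : (decide (start < 45) && decide (45 < start + size)) = false := by
        rcases not_and_or.mp h with h' | h' <;> simp [h']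
      simp only [hb, Bool.false_or]
      simp [h]

-- ===== VERDICT (by name: the statement is the Claim_ definition above) =====
theorem build_blocks_from_pattern_spec : Claim_equal_build_blocks_from_pattern := by
  intro pattern _
  unfold Spec_build_blocks_from_pattern build_blocks_from_pattern build_blocks_from_pattern_alt
  simpa using bbfpGoA_eq pattern 0 []
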